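-- pv_equiv track=rewrite | github.com/mett/adventofcode2018 | 2/checksum.py | count
-- ===== SOURCE A (Python) =====
-- def count(candidate: str) -> tuple:
--     """
--     counts if there are any double or triple occurances of a char in the given string.
--     returns a tuple of if there are any doubles or triples.
--     """
--     doubles = 0
--     triples = 0
--     for char in candidate:
--         if doubles == 0 and candidate.count(char) == 2:
--             doubles = 1
--         elif triples == 0 and candidate.count(char) == 3:
--             triples = 1
--
--         if doubles == 1 and triples == 1:
--             return (1,1)
--     return (doubles, triples)
-- ===== SOURCE B (Python) =====
-- def count(candidate: str) -> tuple:
--     """Sort the characters, then scan consecutive equal runs once;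
--     a run of length 2 means a double, of length 3 a triple."""
--     doubles = 0
--     triples = 0
--     s = sorted(candidate)
--     n = len(s)
--     i = 0
--     while i < n:
--         j = i
--         while j < n and s[j] == s[i]:
--             j += 1
--         run = j - i
--         if run == 2:
--             doubles = 1
--         elif run == 3:
--             triples = 1
--         i = j
--     return (doubles, triples)
-- ===== Notes on version B (the rewrite author's own statement) =====
-- stated objective: faster
-- what changed: Replaces the per-character candidate.count scan (quadratic) by sorting the characters once and scanning consecutive equal runs, setting the flags from each run's length.
import Mathlib
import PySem

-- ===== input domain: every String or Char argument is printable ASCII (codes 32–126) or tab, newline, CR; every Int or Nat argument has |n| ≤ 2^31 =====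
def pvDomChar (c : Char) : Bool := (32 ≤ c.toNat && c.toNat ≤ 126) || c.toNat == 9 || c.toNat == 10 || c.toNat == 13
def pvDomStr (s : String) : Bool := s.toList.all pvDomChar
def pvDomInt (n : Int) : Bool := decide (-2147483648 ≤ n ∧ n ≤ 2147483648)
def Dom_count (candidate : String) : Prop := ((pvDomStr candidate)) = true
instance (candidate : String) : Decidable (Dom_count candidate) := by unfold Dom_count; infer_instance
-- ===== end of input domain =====

-- B sorts the characters once and scans consecutive equal runs instead of calling candidate.count for every character (objective: faster).

-- ===== PORT A =====
-- the for-loop with its (doubles, triples) state and the early return (1,1);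
-- candidate.count(char) for a one-character needle is exactly List.count on the characters
def countA_loop (full : List Char) : List Char → Int → Int → List Int
  | [], d, t => [d, t]
  | c :: rest, d, t =>
    let cnt : Int := (full.count c : Int)
    let dt : Int × Int :=
      if d = 0 ∧ cnt = 2 then (1, t)
      else if t = 0 ∧ cnt = 3 then (d, 1)
      else (d, t)
    if dt.1 = 1 ∧ dt.2 = 1 then [1, 1]
    else countA_loop full rest dt.1 dt.2

def count (candidate : String) : List Int :=
  countA_loop candidate.toList candidate.toList 0 0

-- ===== PORT B =====
-- the outer while-loop of Source B: each step consumes one run of equal characters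
-- (the inner while advancing j over equal chars is the takeWhile/dropWhile split at the run's head)
def countB_loop : List Char → Int → Int → List Int
  | [], d, t => [d, t]
  | c :: rest, d, t =>
    let run : Int := 1 + ((rest.takeWhile (· = c)).length : Int)
    let d' : Int := if run = 2 then 1 else d
    let t' : Int := if ¬ run = 2 ∧ run = 3 then 1 else t
    countB_loop (rest.dropWhile (· = c)) d' t'
termination_by l => l.length
decreasing_by
  simpa [Nat.lt_succ_iff] using List.length_dropWhile_le (· = c) rest

def count_alt (candidate : String) : List Int :=
  countB_loop (PySem.List.sorted candidate.toList (fun x => x) false) 0 0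

-- ===== PRECONDITION & SPEC =====
def Spec_count (candidate : String) (out : List Int) : Prop := out = count_alt candidate
instance (candidate : String) (out : List Int) : Decidable (Spec_count candidate out) := by unfold Spec_count; infer_instance

-- ===== CLAIM (what is proved, stated in full; the proofs are below) =====
def Claim_equal_count : Prop := ∀ (candidate : String), Dom_count candidate → Spec_count candidate (count candidate)

-- ===== LEMMAS AND PROOFS =====

-- A's loop sets doubles/triples exactly when some remaining char has full-count 2 (resp. 3)
theorem countA_loop_eq (full : List Char) (rest : List Char) (d t : Int)
    (hd : d = 0 ∨ d = 1) (ht : t = 0 ∨ t = 1) :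
    countA_loop full rest d t =
      [if d = 1 ∨ ∃ c ∈ rest, (full.count c : Int) = 2 then 1 else 0,
       if t = 1 ∨ ∃ c ∈ rest, (full.count c : Int) = 3 then 1 else 0] := by
  induction rest generalizing d t with
  | nil =>
    rcases hd with rfl | rfl <;> rcases ht with rfl | rfl <;> simp [countA_loop]
  | cons c rest ih =>
    simp only [countA_loop]
    by_cases h2 : d = 0 ∧ (full.count c : Int) = 2
    · have hne3 : ¬ (full.count c : Int) = 3 := by omega
      by_cases ht1 : t = 1
      · subst ht1
        simp [h2, List.mem_cons]
      · have ht0 : t = 0 := by rcases ht with rfl | rfl <;> simp_all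
        subst ht0
        rw [if_pos h2, if_neg (by norm_num), ih 1 0 (Or.inr rfl) (Or.inl rfl)]
        simp only [List.exists_mem_cons_iff, List.cons.injEq, and_true]
        exact ⟨if_congr (by tauto) rfl rfl, if_congr (by tauto) rfl rfl⟩
    · rw [if_neg h2]
      by_cases h3 : t = 0 ∧ (full.count c : Int) = 3
      · have hne2 : ¬ (full.count c : Int) = 2 := by omega
        by_cases hd1 : d = 1
        · subst hd1
          simp [h3, List.mem_cons]
        · have hd0 : d = 0 := by rcases hd with rfl | rfl <;> simp_all
          subst hd0
          rw [if_pos h3, if_neg (by norm_num), ih 0 1 (Or.inl rfl) (Or.inr rfl)]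
          simp only [List.exists_mem_cons_iff, List.cons.injEq, and_true]
          exact ⟨if_congr (by tauto) rfl rfl, if_congr (by tauto) rfl rfl⟩
      · rw [if_neg h3]
        by_cases hdt : d = 1 ∧ t = 1
        · rw [if_pos hdt]
          simp [hdt.1, hdt.2]
        · rw [if_neg hdt, ih d t hd ht]
          simp only [List.exists_mem_cons_iff, List.cons.injEq, and_true]
          exact ⟨if_congr (by tauto) rfl rfl, if_congr (by tauto) rfl rfl⟩

-- in a ≤-sorted list, dropping the leading run of c leaves only characters strictly above c
theorem not_mem_dropWhile_sorted (c : Char) :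
    ∀ (rest : List Char), (∀ x ∈ rest, c ≤ x) → rest.Pairwise (· ≤ ·) →
      ∀ x ∈ rest.dropWhile (· = c), c < x := by
  intro rest
  induction rest with
  | nil => intro _ _ x hx; simp at hx
  | cons a l ih =>
    intro hle hpw x hx
    by_cases hac : a = c
    · subst hac
      rw [List.dropWhile_cons_of_pos (by simp)] at hx
      exact ih (fun y hy => hle y (List.mem_cons_of_mem _ hy)) hpw.tail x hx
    · rw [List.dropWhile_cons_of_neg (by simp [hac])] at hx
      have hca : c < a := lt_of_le_of_ne (hle a (List.mem_cons_self)) (Ne.symm hac)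
      rcases List.mem_cons.mp hx with rfl | hxl
      · exact hca
      · exact lt_of_lt_of_le hca ((List.pairwise_cons.mp hpw).1 x hxl)

-- B's run scan over a sorted list sets the flags exactly when some char has count 2 (resp. 3)
theorem countB_loop_eq_aux : ∀ (n : Nat) (s : List Char) (d t : Int),
    s.length ≤ n → s.Pairwise (· ≤ ·) →
    (d = 0 ∨ d = 1) → (t = 0 ∨ t = 1) →
    countB_loop s d t =
      [if d = 1 ∨ ∃ c ∈ s, (s.count c : Int) = 2 then 1 else 0,
       if t = 1 ∨ ∃ c ∈ s, (s.count c : Int) = 3 then 1 else 0] := by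
  intro n
  induction n with
  | zero =>
    intro s d t hlen _ hd ht
    have : s = [] := List.eq_nil_of_length_eq_zero (Nat.le_zero.mp hlen)
    subst this
    rcases hd with rfl | rfl <;> rcases ht with rfl | rfl <;> simp [countB_loop]
  | succ n ihn =>
    intro s d t hlen hpw hd ht
    match s with
    | [] =>
      rcases hd with rfl | rfl <;> rcases ht with rfl | rfl <;> simp [countB_loop]
    | c :: rest =>
      have hle : ∀ x ∈ rest, c ≤ x := (List.pairwise_cons.mp hpw).1
      have hdwlt : ∀ x ∈ rest.dropWhile (fun x => decide (x = c)), c < x :=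
        not_mem_dropWhile_sorted c rest hle hpw.tail
      have hdwpw : (rest.dropWhile (fun x => decide (x = c))).Pairwise (· ≤ ·) :=
        hpw.tail.sublist (List.dropWhile_sublist _)
      have htw : ∀ x ∈ rest.takeWhile (fun x => decide (x = c)), x = c := by
        intro x hx
        simpa using List.mem_takeWhile_imp hx
      have hrest : rest.takeWhile (fun x => decide (x = c)) ++ rest.dropWhile (fun x => decide (x = c)) = rest :=
        List.takeWhile_append_dropWhile
      have hsplit : ∀ y : Char, rest.count y
          = (rest.takeWhile (fun x => decide (x = c))).count y
            + (rest.dropWhile (fun x => decide (x = c))).count y := by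
        intro y
        conv_lhs => rw [← hrest]
        exact List.count_append ..
      set run : Int := 1 + ((rest.takeWhile (fun x => decide (x = c))).length : Int) with hrun
      have hcc : ((c :: rest).count c : Int) = run := by
        have h1 : (rest.takeWhile (fun x => decide (x = c))).count c
            = (rest.takeWhile (fun x => decide (x = c))).length :=
          List.count_eq_length.mpr (fun b hb => (htw b hb).symm)
        have h2 : (rest.dropWhile (fun x => decide (x = c))).count c = 0 :=
          List.count_eq_zero.mpr (fun h => lt_irrefl c (hdwlt c h))
        rw [List.count_cons_self, hrun]
        push_cast
        rw [hsplit c, h1, h2]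
        push_cast
        ring
      have hcx : ∀ x ∈ rest.dropWhile (fun x => decide (x = c)),
          (c :: rest).count x = (rest.dropWhile (fun x => decide (x = c))).count x := by
        intro x hx
        have hxc : x ≠ c := fun h => lt_irrefl c (h ▸ hdwlt x hx)
        have h1 : (rest.takeWhile (fun x => decide (x = c))).count x = 0 :=
          List.count_eq_zero.mpr (fun h => hxc (htw x h))
        rw [List.count_cons, hsplit x, h1]
        simp [Ne.symm hxc]
      have hEx : ∀ k : Int,
          (∃ x ∈ c :: rest, ((c :: rest).count x : Int) = k) ↔
          (run = k ∨ ∃ x ∈ rest.dropWhile (fun x => decide (x = c)),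
              ((rest.dropWhile (fun x => decide (x = c))).count x : Int) = k) := by
        intro k
        constructor
        · rintro ⟨x, hx, hk⟩
          rcases List.mem_cons.mp hx with rfl | hxr
          · exact Or.inl (hcc ▸ hk)
          · rw [← hrest] at hxr
            rcases List.mem_append.mp hxr with hxt | hxd
            · have : x = c := htw x hxt
              subst this
              exact Or.inl (hcc ▸ hk)
            · exact Or.inr ⟨x, hxd, by rw [← hcx x hxd]; exact hk⟩
        · rintro (hk | ⟨x, hx, hk⟩)
          · exact ⟨c, List.mem_cons_self, by rw [hcc]; exact hk⟩
          · refine ⟨x, ?_, by rw [hcx x hx]; exact hk⟩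
            exact List.mem_cons_of_mem _ ((List.dropWhile_sublist _).subset hx)
      have hlen' : (rest.dropWhile (fun x => decide (x = c))).length ≤ n := by
        have := List.length_dropWhile_le (fun x => decide (x = c)) rest
        simp only [List.length_cons] at hlen
        omega
      rw [countB_loop]
      simp only [← hrun]
      by_cases hr2 : run = 2
      · have hr3 : ¬ run = 3 := by omega
        rw [if_pos hr2, if_neg (by tauto),
            ihn _ 1 t hlen' hdwpw (Or.inr rfl) ht]
        simp only [hEx, List.cons.injEq, and_true]
        exact ⟨if_congr (by tauto) rfl rfl, if_congr (by tauto) rfl rfl⟩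
      · by_cases hr3 : run = 3
        · rw [if_neg hr2, if_pos ⟨hr2, hr3⟩,
              ihn _ d 1 hlen' hdwpw hd (Or.inr rfl)]
          simp only [hEx, List.cons.injEq, and_true]
          exact ⟨if_congr (by tauto) rfl rfl, if_congr (by tauto) rfl rfl⟩
        · rw [if_neg hr2, if_neg (by tauto),
              ihn _ d t hlen' hdwpw hd ht]
          simp only [hEx, List.cons.injEq, and_true]
          exact ⟨if_congr (by tauto) rfl rfl, if_congr (by tauto) rfl rfl⟩

-- ===== VERDICT (by name: the statement is the Claim_ definition above) =====
theorem count_spec : Claim_equal_count := by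
  intro candidate _
  unfold Spec_count count count_alt
  set l := candidate.toList with hl
  set s := PySem.List.sorted l (fun x => x) false with hs
  have hperm : s.Perm l := PySem.List.sorted_perm l (fun x => x) false
  have hpw : s.Pairwise (· ≤ ·) := by
    simpa using PySem.List.sorted_pairwise l (fun x => x)
  rw [countA_loop_eq l l 0 0 (Or.inl rfl) (Or.inl rfl),
      countB_loop_eq_aux s.length s 0 0 le_rfl hpw (Or.inl rfl) (Or.inl rfl)]
  have hiff : ∀ k : Int, (∃ c ∈ l, (l.count c : Int) = k) ↔ (∃ c ∈ s, (s.count c : Int) = k) := by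
    intro k
    constructor
    · rintro ⟨c, hc, hk⟩
      exact ⟨c, hperm.mem_iff.mpr hc, by rwa [hperm.count_eq]⟩
    · rintro ⟨c, hc, hk⟩
      exact ⟨c, hperm.mem_iff.mp hc, by rwa [← hperm.count_eq]⟩
  simp only [hiff]
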